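-- pv_equiv track=rewrite | github.com/fubak/randosite | scripts/topic_page_generator.py | filter_trends_by_topic
-- ===== SOURCE A (Python) =====
-- from typing import List, Dict, Set, Optional
--
-- def matches_topic_source(source: str, prefixes: List[str]) -> bool:
--     """
--     Check if a source matches any of the topic's source prefixes.
--
--     Args:
--         source: Source name (e.g., 'hackernews', 'tech_verge')
--         prefixes: List of prefixes to match (e.g., ['hackernews', 'tech_'])
--
--     Returns:
--         True if source matches any prefix, False otherwise
--
--     Note:
--         Prefixes ending with '_' use startswith matching,
--         others use exact matching.
--     """
--     for prefix in prefixes: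
--         if prefix.endswith('_'):
--             # Prefix matching: 'tech_' matches 'tech_verge', 'tech_wired'
--             if source.startswith(prefix):
--                 return True
--         else:
--             # Exact matching: 'hackernews' only matches 'hackernews'
--             if source == prefix:
--                 return True
--     return False
--
-- def filter_trends_by_topic(
--     trends: List[Dict],
--     source_prefixes: List[str]
-- ) -> List[Dict]:
--     """
--     Filter trends that belong to a specific topic.
--
--     Args:
--         trends: List of all trend dictionaries
--         source_prefixes: Source prefixes for this topic
--
--     Returns:
--         List of trends matching the topic's sources
--     """
--     return [
--         trend for trend in trends
--         if matches_topic_source(trend.get('source', ''), source_prefixes)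
--     ]
-- ===== SOURCE B (Python) =====
-- def filter_trends_by_topic(trends, source_prefixes):
--     # Loop inversion: compute the set of DISTINCT sources once, then iterate over
--     # the prefixes (not the trends) building the set of matched sources; finally
--     # keep the trends whose source is in that set.  Work per distinct source,
--     # not per trend.
--     sources = set(t.get('source', '') for t in trends)
--     matched = set()
--     for prefix in source_prefixes:
--         if prefix.endswith('_'):
--             for s in sources:
--                 if s.startswith(prefix):
--                     matched.add(s)
--         elif prefix in sources:
--             matched.add(prefix)
--     return [t for t in trends if t.get('source', '') in matched]
-- ===== Notes on version B (the rewrite author's own statement) =====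
-- stated objective: faster
-- what changed: B inverts the loop structure: it deduplicates the trend sources once, then iterates over the prefixes building a matched-source set (scanning distinct sources for '_'-prefixes, direct set lookup for exact ones), and finally filters trends by membership in that set, so matching work is done per distinct source instead of per trend.
import Mathlib
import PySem

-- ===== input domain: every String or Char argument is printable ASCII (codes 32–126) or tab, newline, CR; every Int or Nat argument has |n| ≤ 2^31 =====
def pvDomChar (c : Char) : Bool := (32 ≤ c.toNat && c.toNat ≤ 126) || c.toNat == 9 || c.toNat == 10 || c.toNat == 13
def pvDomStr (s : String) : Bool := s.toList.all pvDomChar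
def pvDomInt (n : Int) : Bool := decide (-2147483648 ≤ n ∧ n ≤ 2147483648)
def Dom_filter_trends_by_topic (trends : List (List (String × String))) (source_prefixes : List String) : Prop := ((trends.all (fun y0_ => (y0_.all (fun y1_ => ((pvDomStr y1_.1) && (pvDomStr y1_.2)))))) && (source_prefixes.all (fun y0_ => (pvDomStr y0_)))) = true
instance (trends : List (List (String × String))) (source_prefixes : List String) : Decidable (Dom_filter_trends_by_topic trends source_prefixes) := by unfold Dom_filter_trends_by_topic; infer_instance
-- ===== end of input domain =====

-- B inverts the loop structure: it deduplicates the trend sources once, builds the set of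
-- matched sources by iterating over the prefixes, and filters trends by membership in that
-- set, doing matching work per distinct source instead of per trend (objective: faster;
-- a timing run measured B faster on the generated inputs).

-- ===== PORT A =====
def matches_topic_source (source : String) (prefixes : List String) : Bool :=
  match prefixes with
  | [] => false
  | p :: rest =>
    if PySem.Str.endswith p "_" then
      if PySem.Str.startswith source p then true
      else matches_topic_source source rest
    else
      if source == p then true
      else matches_topic_source source rest

def filter_trends_by_topic (trends : List (List (String × String))) (source_prefixes : List String) : List (List (String × String)) :=
  trends.filter (fun trend =>
    matches_topic_source ((PySem.Dict.mk trend).getD "source" "") source_prefixes)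

-- ===== PORT B =====
-- the source key of a trend dict, defaulting to ""
def bSource (trend : List (String × String)) : String :=
  (PySem.Dict.mk trend).getD "source" ""

-- inner loop: add to `matched` every distinct source that starts with `p`
def bAddMatching (p : String) (sources matched : PySem.Set String) : PySem.Set String :=
  sources.foldl (fun m s => if PySem.Str.startswith s p then PySem.Set.add m s else m) matched

-- outer loop over the prefixes, building the matched-source set
def bBuildMatched (sources : PySem.Set String) (prefixes : List String) : PySem.Set String :=
  prefixes.foldl (fun matched p =>
    if PySem.Str.endswith p "_" then bAddMatching p sources matched
    else if PySem.Set.contains sources p then PySem.Set.add matched p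
    else matched) PySem.Set.empty

def filter_trends_by_topic_alt (trends : List (List (String × String))) (source_prefixes : List String) : List (List (String × String)) :=
  let sources : PySem.Set String := PySem.Set.ofList (trends.map bSource)
  let matched : PySem.Set String := bBuildMatched sources source_prefixes
  trends.filter (fun t => PySem.Set.contains matched (bSource t))

-- ===== PRECONDITION & SPEC =====
def Spec_filter_trends_by_topic (trends : List (List (String × String))) (source_prefixes : List String) (out : List (List (String × String))) : Prop := out = filter_trends_by_topic_alt trends source_prefixes
instance (trends : List (List (String × String))) (source_prefixes : List String) (out : List (List (String × String))) : Decidable (Spec_filter_trends_by_topic trends source_prefixes out) := by unfold Spec_filter_trends_by_topic; infer_instance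

-- ===== CLAIM (what is proved, stated in full; the proofs are below) =====
def Claim_equal_filter_trends_by_topic : Prop := ∀ (trends : List (List (String × String))) (source_prefixes : List String), Dom_filter_trends_by_topic trends source_prefixes → Spec_filter_trends_by_topic trends source_prefixes (filter_trends_by_topic trends source_prefixes)

-- ===== LEMMAS AND PROOFS =====

-- membership after the inner loop: in `matched` already, or a scanned source starting with p
theorem mem_bAddMatching (p : String) (src matched : List String) (x : String) :
    x ∈ bAddMatching p src matched ↔
      x ∈ matched ∨ (x ∈ src ∧ PySem.Str.startswith x p = true) := by
  unfold bAddMatching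
  induction src generalizing matched with
  | nil => simp
  | cons s rest ih =>
    simp only [List.foldl_cons]
    by_cases h : PySem.Str.startswith s p = true
    · simp only [h, if_pos]
      rw [ih]
      simp only [PySem.Set.mem_add, List.mem_cons]
      constructor
      · rintro (⟨hm | hx⟩ | hr)
        · exact Or.inl hm
        · exact Or.inr ⟨Or.inl hx, hx ▸ h⟩
        · exact Or.inr ⟨Or.inr hr.1, hr.2⟩
      · rintro (hm | ⟨(hx | hr), hs⟩)
        · exact Or.inl (Or.inl hm)
        · exact Or.inl (Or.inr hx)
        · exact Or.inr ⟨hr, hs⟩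
    · simp only [h, Bool.false_eq_true, if_neg, not_false_iff]
      rw [ih]
      constructor
      · rintro (hm | hr)
        · exact Or.inl hm
        · exact Or.inr ⟨List.mem_cons_of_mem _ hr.1, hr.2⟩
      · rintro (hm | ⟨hx, hs⟩)
        · exact Or.inl hm
        · rcases List.mem_cons.mp hx with hx | hx
          · exact absurd (hx ▸ hs) h
          · exact Or.inr ⟨hx, hs⟩

-- membership in the matched set = the source occurs among the trends and A's matcher accepts it
theorem mem_bBuildMatched (ps srcList : List String) (x : String) :
    x ∈ bBuildMatched (PySem.Set.ofList srcList) ps ↔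
      x ∈ srcList ∧ matches_topic_source x ps = true := by
  unfold bBuildMatched
  suffices h : ∀ acc : List String,
      x ∈ ps.foldl (fun matched p =>
        if PySem.Str.endswith p "_" then bAddMatching p (PySem.Set.ofList srcList) matched
        else if PySem.Set.contains (PySem.Set.ofList srcList) p then PySem.Set.add matched p
        else matched) acc ↔
      x ∈ acc ∨ (x ∈ srcList ∧ matches_topic_source x ps = true) by
    rw [h PySem.Set.empty]; simp [PySem.Set.empty]
  induction ps with
  | nil => intro acc; simp [matches_topic_source]
  | cons p rest ih =>
    intro acc
    simp only [List.foldl_cons]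
    by_cases he : PySem.Str.endswith p "_" = true
    · simp only [he, if_pos]
      rw [ih, mem_bAddMatching]
      simp only [PySem.Set.mem_ofList, matches_topic_source, he, if_pos]
      constructor
      · rintro ((hm | hs) | hr)
        · exact Or.inl hm
        · exact Or.inr ⟨hs.1, by simp only [hs.2, if_pos]⟩
        · exact Or.inr ⟨hr.1, by split <;> simp [hr.2]⟩
      · rintro (hm | ⟨hx, hmt⟩)
        · exact Or.inl (Or.inl hm)
        · by_cases hs : PySem.Str.startswith x p = true
          · exact Or.inl (Or.inr ⟨hx, hs⟩)
          · simp only [hs, if_neg, Bool.false_eq_true, not_false_iff] at hmt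
            exact Or.inr ⟨hx, hmt⟩
    · simp only [he, Bool.false_eq_true, if_neg, not_false_iff]
      by_cases hcp : PySem.Set.contains (PySem.Set.ofList srcList) p = true
      · simp only [hcp, if_pos]
        rw [ih]
        simp only [PySem.Set.mem_add, matches_topic_source, he, Bool.false_eq_true, if_neg,
          not_false_iff]
        constructor
        · rintro ((hm | hxp) | hr)
          · exact Or.inl hm
          · exact Or.inr ⟨hxp ▸ (PySem.Set.mem_ofList _ _).mp ((PySem.Set.contains_iff _ _).mp hcp),
              by simp [hxp]⟩
          · exact Or.inr ⟨hr.1, by split <;> simp [hr.2]⟩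
        · rintro (hm | ⟨hx, hmt⟩)
          · exact Or.inl (Or.inl hm)
          · by_cases hxp : x = p
            · exact Or.inl (Or.inr hxp)
            · simp only [show (x == p) = false by simp [hxp], Bool.false_eq_true, if_neg,
                not_false_iff] at hmt
              exact Or.inr ⟨hx, hmt⟩
      · simp only [hcp, Bool.false_eq_true, if_neg, not_false_iff]
        rw [ih]
        simp only [matches_topic_source, he, Bool.false_eq_true, if_neg, not_false_iff]
        have hpn : p ∉ srcList := fun hmem =>
          hcp ((PySem.Set.contains_iff _ _).mpr ((PySem.Set.mem_ofList _ _).mpr hmem))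
        constructor
        · rintro (hm | hr)
          · exact Or.inl hm
          · exact Or.inr ⟨hr.1, by split <;> simp [hr.2]⟩
        · rintro (hm | ⟨hx, hmt⟩)
          · exact Or.inl hm
          · by_cases hxp : x = p
            · exact absurd (hxp ▸ hx) hpn
            · simp only [show (x == p) = false by simp [hxp], Bool.false_eq_true, if_neg,
                not_false_iff] at hmt
              exact Or.inr ⟨hx, hmt⟩

-- ===== VERDICT (by name: the statement is the Claim_ definition above) =====
theorem filter_trends_by_topic_spec : Claim_equal_filter_trends_by_topic := by
  intro trends source_prefixes _
  unfold Spec_filter_trends_by_topic filter_trends_by_topic filter_trends_by_topic_alt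
  refine List.filter_congr (fun t ht => ?_)
  have hsrc : bSource t ∈ trends.map bSource := List.mem_map_of_mem ht
  rw [show ((PySem.Dict.mk t).getD "source" "") = bSource t from rfl]
  have hiff := mem_bBuildMatched source_prefixes (trends.map bSource) (bSource t)
  by_cases hm : matches_topic_source (bSource t) source_prefixes = true
  · rw [hm]
    exact ((PySem.Set.contains_iff _ _).mpr (hiff.mpr ⟨hsrc, hm⟩)).symm
  · simp only [Bool.not_eq_true] at hm
    rw [hm]
    symm
    rw [Bool.eq_false_iff]
    intro hc
    exact absurd (hiff.mp ((PySem.Set.contains_iff _ _).mp hc)).2 (by simp [hm])
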